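-- pv_equiv track=rewrite | github.com/ahb-sjsu/polite-submit | polite_submit/prober.py | parse_sinfo
-- ===== SOURCE A (Python) =====
-- def parse_sinfo(output: str) -> tuple[int, int, int]:
--     """
--     Parse sinfo output to get node counts.
--
--     Expected format from: sinfo -h -p <partition> -o '%D %t'
--     Example output:
--         4 alloc
--         2 idle
--         1 mix
--
--     Returns:
--         (total_nodes, allocated_nodes, idle_nodes)
--     """
--     total = 0
--     allocated = 0
--     idle = 0
--
--     for line in output.strip().split("\n"):
--         if not line.strip():
--             continue
--         parts = line.split()
--         if len(parts) >= 2: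
--             count = int(parts[0])
--             state = parts[1].lower()
--             total += count
--             if state in ("alloc", "allocated", "mix", "mixed"):
--                 allocated += count
--             elif state in ("idle",):
--                 idle += count
--
--     return total, allocated, idle
-- ===== SOURCE B (Python) =====
-- def parse_sinfo(output: str) -> tuple[int, int, int]:
--     """Index-build pass (state -> summed count) plus a separate reduction."""
--     counts: dict[str, int] = {}
--     for line in output.strip().split("\n"):
--         if not line.strip():
--             continue
--         parts = line.split()
--         if len(parts) >= 2:
--             state = parts[1].lower()
--             counts[state] = counts.get(state, 0) + int(parts[0])
--     total = sum(counts.values())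
--     allocated = sum(counts.get(k, 0) for k in ("alloc", "allocated", "mix", "mixed"))
--     idle = counts.get("idle", 0)
--     return total, allocated, idle
-- ===== Notes on version B (the rewrite author's own statement) =====
-- stated objective: alternative
-- what changed: A's loop interleaves the three accumulators with per-line branching; B's loop only builds a state->summed-count table (int() still inside the loop so ValueError behaviour matches) and then derives total, allocated and idle from the table in a separate reduction.
import Mathlib
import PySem

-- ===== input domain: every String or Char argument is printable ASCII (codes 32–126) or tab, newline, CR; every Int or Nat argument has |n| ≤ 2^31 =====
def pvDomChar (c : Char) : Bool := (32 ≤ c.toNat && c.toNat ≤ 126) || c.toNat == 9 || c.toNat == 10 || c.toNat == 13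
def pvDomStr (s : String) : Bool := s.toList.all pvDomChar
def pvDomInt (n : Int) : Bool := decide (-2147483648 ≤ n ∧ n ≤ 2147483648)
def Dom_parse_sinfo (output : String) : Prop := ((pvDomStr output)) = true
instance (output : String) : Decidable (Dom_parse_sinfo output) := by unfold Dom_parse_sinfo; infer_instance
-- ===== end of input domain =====

-- B replaces A's interleaved branch-and-accumulate loop by one pass building a
-- state -> summed-count table, then derives the three totals from the table (objective: alternative).

-- ===== PORT A =====
-- one iteration of A's loop over (total, allocated, idle)
def pvAStep (st : Int × Int × Int) (line : String) : Int × Int × Int :=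
  if PySem.Str.strip line = "" then st
  else if 2 ≤ (PySem.Str.split₀ line).length then
    match PySem.Int.ofStr? ((PySem.Str.split₀ line).getD 0 "") with
    | none => st  -- int(parts[0]) raises ValueError in Python; excluded by Pre_
    | some count =>
      if PySem.Str.lower ((PySem.Str.split₀ line).getD 1 "") = "alloc" ∨
         PySem.Str.lower ((PySem.Str.split₀ line).getD 1 "") = "allocated" ∨
         PySem.Str.lower ((PySem.Str.split₀ line).getD 1 "") = "mix" ∨
         PySem.Str.lower ((PySem.Str.split₀ line).getD 1 "") = "mixed" then
        (st.1 + count, st.2.1 + count, st.2.2)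
      else if PySem.Str.lower ((PySem.Str.split₀ line).getD 1 "") = "idle" then
        (st.1 + count, st.2.1, st.2.2 + count)
      else (st.1 + count, st.2.1, st.2.2)
  else st

def parse_sinfo (output : String) : Int × Int × Int :=
  ((PySem.Str.split? (PySem.Str.strip output) "\n").getD []).foldl pvAStep (0, 0, 0)

-- ===== PORT B =====
-- one iteration of B's loop building the state -> summed-count table
def pvBStep (d : PySem.Dict String Int) (line : String) : PySem.Dict String Int :=
  if PySem.Str.strip line = "" then d
  else if 2 ≤ (PySem.Str.split₀ line).length then
    match PySem.Int.ofStr? ((PySem.Str.split₀ line).getD 0 "") with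
    | none => d  -- int(parts[0]) raises ValueError in Python; excluded by Pre_
    | some count => d.modify (PySem.Str.lower ((PySem.Str.split₀ line).getD 1 "")) 0 (· + count)
  else d

def pvAllocKeys : List String := ["alloc", "allocated", "mix", "mixed"]

def parse_sinfo_alt (output : String) : Int × Int × Int :=
  let counts :=
    ((PySem.Str.split? (PySem.Str.strip output) "\n").getD []).foldl pvBStep PySem.Dict.empty
  (counts.values.sum,
   (pvAllocKeys.map (fun k => counts.getD k 0)).sum,
   counts.getD "idle" 0)

-- ===== PRECONDITION & SPEC =====
-- Pre_ excludes exactly the inputs where some kept line's first field is not a valid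
-- Python int literal: there both A and B raise ValueError.
def Pre_parse_sinfo (output : String) : Prop :=
  ∀ line ∈ (PySem.Str.split? (PySem.Str.strip output) "\n").getD [],
    PySem.Str.strip line ≠ "" → 2 ≤ (PySem.Str.split₀ line).length →
      (PySem.Int.ofStr? ((PySem.Str.split₀ line).getD 0 "")).isSome = true

instance (output : String) : Decidable (Pre_parse_sinfo output) := by
  unfold Pre_parse_sinfo; infer_instance

def pvWitness_parse_sinfo : String := "4 alloc\n2 idle\n1 mix"

def Spec_parse_sinfo (output : String) (out : Int × Int × Int) : Prop := out = parse_sinfo_alt output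
instance (output : String) (out : Int × Int × Int) : Decidable (Spec_parse_sinfo output out) := by
  unfold Spec_parse_sinfo; infer_instance

-- ===== CLAIM (what is proved, stated in full; the proofs are below) =====
def Claim_equal_parse_sinfo : Prop :=
  ∀ (output : String), Dom_parse_sinfo output → Pre_parse_sinfo output →
    Spec_parse_sinfo output (parse_sinfo output)

-- ===== LEMMAS AND PROOFS =====

-- the sum B takes over a fixed key list
def pvS (ks : List String) (d : PySem.Dict String Int) : Int :=
  (ks.map (fun k => d.getD k 0)).sum

theorem pvS_modify_not_mem (ks : List String) (d : PySem.Dict String Int) (k : String)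
    (c : Int) (hk : k ∉ ks) :
    pvS ks (d.modify k 0 (· + c)) = pvS ks d := by
  induction ks with
  | nil => rfl
  | cons x xs ih =>
    have ht := ih (fun h => hk (List.mem_cons_of_mem _ h))
    simp only [pvS, List.map_cons, List.sum_cons] at ht ⊢
    rw [PySem.Dict.getD_modify, if_neg (by rintro rfl; exact hk List.mem_cons_self), ht]

theorem pvS_modify_mem (ks : List String) (d : PySem.Dict String Int) (k : String)
    (c : Int) (hnd : ks.Nodup) (hk : k ∈ ks) :
    pvS ks (d.modify k 0 (· + c)) = pvS ks d + c := by
  induction ks with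
  | nil => cases hk
  | cons x xs ih =>
    rcases List.nodup_cons.mp hnd with ⟨hx, hxs⟩
    rcases List.mem_cons.mp hk with rfl | hmem
    · have ht := pvS_modify_not_mem xs d k c hx
      simp only [pvS, List.map_cons, List.sum_cons] at ht ⊢
      rw [PySem.Dict.getD_modify, if_pos rfl, ht]; ring
    · have hxk : x ≠ k := by rintro rfl; exact hx hmem
      have ht := ih hxs hmem
      simp only [pvS, List.map_cons, List.sum_cons] at ht ⊢
      rw [PySem.Dict.getD_modify, if_neg hxk, ht]; ring

-- B's derived triple from a table
def pvTriple (d : PySem.Dict String Int) : Int × Int × Int :=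
  (pvS d.keys d, pvS pvAllocKeys d, d.getD "idle" 0)

theorem pvTriple_modify (d : PySem.Dict String Int) (k : String) (c : Int)
    (hnd : d.keys.Nodup) :
    pvTriple (d.modify k 0 (· + c)) =
      (pvS d.keys d + c,
       (if k ∈ pvAllocKeys then pvS pvAllocKeys d + c else pvS pvAllocKeys d),
       (if k = "idle" then d.getD "idle" 0 + c else d.getD "idle" 0)) := by
  have hkeys := PySem.Dict.keys_modify d k 0 (· + c)
  have halloc : pvS pvAllocKeys (d.modify k 0 (· + c)) =
      (if k ∈ pvAllocKeys then pvS pvAllocKeys d + c else pvS pvAllocKeys d) := by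
    split
    · exact pvS_modify_mem _ _ _ _ (by decide) ‹_›
    · exact pvS_modify_not_mem _ _ _ _ ‹_›
  have hidle : (d.modify k 0 (· + c)).getD "idle" 0 =
      (if k = "idle" then d.getD "idle" 0 + c else d.getD "idle" 0) := by
    rw [PySem.Dict.getD_modify]
    by_cases h : k = "idle"
    · subst h; simp
    · rw [if_neg (fun he => h he.symm), if_neg h]
  rcases hcont : d.contains k with _ | _
  · -- fresh key: keys grow by one
    have hknot : k ∉ d.keys := fun h =>
      by simpa [hcont] using (PySem.Dict.contains_iff_mem_keys d k).mpr h
    have hk2 : (d.modify k 0 (· + c)).keys = d.keys ++ [k] := by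
      rw [hkeys, PySem.Dict.keys_insert_of_not_contains d _ hcont]
    have hfresh : pvS (d.keys ++ [k]) (d.modify k 0 (· + c)) = pvS d.keys d + c := by
      have h1 := pvS_modify_not_mem d.keys d k c hknot
      simp only [pvS, List.map_append, List.sum_append, List.map_cons, List.map_nil,
        List.sum_cons, List.sum_nil] at h1 ⊢
      rw [h1, PySem.Dict.getD_modify, if_pos rfl, PySem.Dict.getD_of_not_contains d 0 hcont]
      ring
    simp only [pvTriple, hk2, hfresh, halloc, hidle]
  · -- existing key: keys unchanged
    have hkmem : k ∈ d.keys := (PySem.Dict.contains_iff_mem_keys d k).mp hcont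
    have hk2 : (d.modify k 0 (· + c)).keys = d.keys := by
      rw [hkeys, PySem.Dict.keys_insert_of_contains d _ hcont]
    simp only [pvTriple, hk2, pvS_modify_mem d.keys d k c hnd hkmem, halloc, hidle]

theorem pvBStep_nodup (d : PySem.Dict String Int) (line : String) (hnd : d.keys.Nodup) :
    (pvBStep d line).keys.Nodup := by
  unfold pvBStep
  split
  · exact hnd
  · split
    · rcases h : PySem.Int.ofStr? ((PySem.Str.split₀ line).getD 0 "") with _ | c
      · exact hnd
      · rw [PySem.Dict.keys_modify]
        rcases hcont : d.contains (PySem.Str.lower ((PySem.Str.split₀ line).getD 1 "")) with _ | _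
        · rw [PySem.Dict.keys_insert_of_not_contains d _ hcont]
          have hno : PySem.Str.lower ((PySem.Str.split₀ line).getD 1 "") ∉ d.keys := by
            intro hm
            have hc := (PySem.Dict.contains_iff_mem_keys d _).mpr hm
            rw [hcont] at hc
            exact Bool.false_ne_true hc
          exact hnd.append (List.nodup_singleton _) (List.disjoint_singleton.mpr hno)
        · rw [PySem.Dict.keys_insert_of_contains d _ hcont]; exact hnd
    · exact hnd

theorem pvFold_nodup (lines : List String) (d : PySem.Dict String Int) (hnd : d.keys.Nodup) :
    (lines.foldl pvBStep d).keys.Nodup := by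
  induction lines generalizing d with
  | nil => exact hnd
  | cons l ls ih => exact ih (pvBStep d l) (pvBStep_nodup d l hnd)

-- the per-line agreement: A's step on B's derived triple is B's step's derived triple
theorem pvStep_agree (d : PySem.Dict String Int) (line : String) (hnd : d.keys.Nodup)
    (hok : PySem.Str.strip line ≠ "" → 2 ≤ (PySem.Str.split₀ line).length →
      (PySem.Int.ofStr? ((PySem.Str.split₀ line).getD 0 "")).isSome = true) :
    pvAStep (pvTriple d) line = pvTriple (pvBStep d line) := by
  unfold pvAStep pvBStep
  split
  · rfl
  · next hblank =>
    split
    · next hlen =>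
      rcases h : PySem.Int.ofStr? ((PySem.Str.split₀ line).getD 0 "") with _ | c
      · exact absurd (hok hblank hlen) (by rw [h]; simp)
      · rw [pvTriple_modify d _ c hnd]
        generalize PySem.Str.lower ((PySem.Str.split₀ line).getD 1 "") = k
        by_cases ha : k = "alloc" ∨ k = "allocated" ∨ k = "mix" ∨ k = "mixed"
        · have hmem : k ∈ pvAllocKeys := by rcases ha with rfl | rfl | rfl | rfl <;> decide
          have hki : k ≠ "idle" := by rcases ha with rfl | rfl | rfl | rfl <;> decide
          simp [pvTriple, ha, hmem, hki]
        · have hmem : k ∉ pvAllocKeys := by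
            simp only [pvAllocKeys, List.mem_cons, List.not_mem_nil, or_false]
            exact ha
          have hni : "idle" ∉ pvAllocKeys := by decide
          by_cases hi : k = "idle" <;> simp [pvTriple, ha, hmem, hi, hni]
    · rfl

theorem pvFold_agree (lines : List String) (d : PySem.Dict String Int)
    (hnd : d.keys.Nodup)
    (hok : ∀ line ∈ lines, PySem.Str.strip line ≠ "" → 2 ≤ (PySem.Str.split₀ line).length →
      (PySem.Int.ofStr? ((PySem.Str.split₀ line).getD 0 "")).isSome = true) :
    lines.foldl pvAStep (pvTriple d) = pvTriple (lines.foldl pvBStep d) := by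
  induction lines generalizing d with
  | nil => rfl
  | cons l ls ih =>
    simp only [List.foldl_cons]
    rw [pvStep_agree d l hnd (hok l List.mem_cons_self)]
    exact ih (pvBStep d l) (pvBStep_nodup d l hnd)
      (fun line hm => hok line (List.mem_cons_of_mem _ hm))

theorem pvTriple_empty : pvTriple PySem.Dict.empty = (0, 0, 0) := by
  simp [pvTriple, pvS, pvAllocKeys, PySem.Dict.getD_empty]

-- ===== VERDICT (by name: the statement is the Claim_ definition above) =====
theorem parse_sinfo_spec : Claim_equal_parse_sinfo := by
  intro output _ hpre
  unfold Spec_parse_sinfo parse_sinfo parse_sinfo_alt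
  rw [← pvTriple_empty,
    pvFold_agree _ PySem.Dict.empty PySem.Dict.nodup_keys_empty hpre]
  have hnd := pvFold_nodup ((PySem.Str.split? (PySem.Str.strip output) "\n").getD [])
    PySem.Dict.empty PySem.Dict.nodup_keys_empty
  simp only [pvTriple, pvS]
  rw [PySem.Dict.values_eq_map_keys _ hnd (0 : Int)]
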